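-- pv_equiv track=rewrite | github.com/EthanBrydon/Millenials-vs-GenX_Project | relationship_strengths.py | positive_negative_conversion
-- ===== SOURCE A (Python) =====
-- def positive_negative_conversion(relationship_strengths):
--     # save neutral relationships to pop after converting to positive/negative
--     neutral_relationships = []
--
--     for player in relationship_strengths:
--         for other_player in relationship_strengths[player]:
--             if relationship_strengths[player][other_player] < 0:
--                 relationship_strengths[player][other_player] = "-"
--             elif relationship_strengths[player][other_player] > 1:
--                 relationship_strengths[player][other_player] = "+"
--             else:
--                 # remove the relationship if it is not within threshold
--                 neutral_relationships.append((player, other_player))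
--
--     for player, other_player in neutral_relationships:
--         relationship_strengths[player].pop(other_player)
--     return relationship_strengths
-- ===== SOURCE B (Python) =====
-- def positive_negative_conversion(relationship_strengths):
--     # Pure recursive rebuild: returns a NEW nested dict (does not mutate the argument,
--     # unlike A, which edits the inner dicts in place).
--     def convert(items):
--         if not items:
--             return {}
--         (other, v), rest = items[0], items[1:]
--         tail = convert(rest)
--         if v < 0:
--             return {other: "-", **tail}
--         if v > 1:
--             return {other: "+", **tail}
--         return tail
--
--     return {player: convert(list(inner.items()))
--             for player, inner in relationship_strengths.items()}
-- ===== Notes on version B (the rewrite author's own statement) =====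
-- stated objective: alternative
-- what changed: Replaces A's two-phase in-place mutation (classify, collect neutral keys, second pop loop) with a pure structural recursion over each inner dict's items that builds a brand-new nested dict, never mutating the argument.
import Mathlib
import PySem

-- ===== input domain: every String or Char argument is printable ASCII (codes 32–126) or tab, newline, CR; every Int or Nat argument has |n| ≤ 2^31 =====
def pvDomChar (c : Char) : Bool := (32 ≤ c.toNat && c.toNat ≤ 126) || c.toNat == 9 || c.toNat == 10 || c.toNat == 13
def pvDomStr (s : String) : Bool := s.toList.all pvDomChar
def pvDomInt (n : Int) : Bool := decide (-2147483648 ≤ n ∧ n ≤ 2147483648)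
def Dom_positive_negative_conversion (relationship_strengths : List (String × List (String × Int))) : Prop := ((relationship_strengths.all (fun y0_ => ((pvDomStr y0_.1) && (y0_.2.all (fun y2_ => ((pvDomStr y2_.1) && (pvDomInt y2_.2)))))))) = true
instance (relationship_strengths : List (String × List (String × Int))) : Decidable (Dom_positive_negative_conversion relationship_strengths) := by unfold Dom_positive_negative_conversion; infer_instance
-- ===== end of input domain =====

-- B replaces A's two-phase in-place mutation (classify, collect neutral keys, second pop loop)
-- with a pure structural recursion that builds a brand-new nested dict (objective: alternative).
-- Side effects differ: A mutates its argument's inner dicts, B leaves the argument untouched;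
-- the theorems below are about the RETURN value only.

-- ===== PORT A =====
-- phase 1 of A's outer loop, per player: convert each value to some "-"/"+" (still-Int neutral
-- entries are `none`), and collect the neutral keys in order.
def pncPhase1 (inner : List (String × Int)) : List (String × Option String) × List String :=
  inner.foldl (fun acc p =>
    if p.2 < 0 then (acc.1 ++ [(p.1, some "-")], acc.2)
    else if p.2 > 1 then (acc.1 ++ [(p.1, some "+")], acc.2)
    else (acc.1 ++ [(p.1, none)], acc.2 ++ [p.1])) ([], [])

-- dict.pop(key): remove the first (= only, for a dict) entry with that key
def pncPop (inner : List (String × Option String)) (key : String) : List (String × Option String) :=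
  match inner with
  | [] => []
  | p :: rest => if p.1 == key then rest else p :: pncPop rest key

-- all popped entries were `none`, so the final filterMap only fixes the type of the survivors
def positive_negative_conversion (relationship_strengths : List (String × List (String × Int))) : List (String × List (String × String)) :=
  relationship_strengths.map (fun pr =>
    let st := pncPhase1 pr.2
    (pr.1, (st.2.foldl pncPop st.1).filterMap (fun q => q.2.map (fun s => (q.1, s)))))

-- ===== PORT B =====
-- Source B's recursive `convert`; `{k: m, **tail}` is `(k, m) :: tail` (tail never contains k:
-- the inner association lists represent dicts, whose keys are distinct — Pre_ below)
def pncConvert : List (String × Int) → List (String × String)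
  | [] => []
  | (k, v) :: rest =>
    let tail := pncConvert rest
    if v < 0 then (k, "-") :: tail
    else if v > 1 then (k, "+") :: tail
    else tail

def positive_negative_conversion_alt (relationship_strengths : List (String × List (String × Int))) : List (String × List (String × String)) :=
  relationship_strengths.map (fun pr => (pr.1, pncConvert pr.2))

-- ===== PRECONDITION & SPEC =====
-- Pre_ restricts the association lists to genuine representations of Python dicts: no duplicate
-- keys in the outer dict nor in any inner dict (a duplicate-key list has no dict counterpart,
-- so A never receives such an input).
def Pre_positive_negative_conversion (relationship_strengths : List (String × List (String × Int))) : Prop :=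
  (relationship_strengths.map Prod.fst).Nodup ∧
    ∀ pr ∈ relationship_strengths, (pr.2.map Prod.fst).Nodup
instance (relationship_strengths : List (String × List (String × Int))) : Decidable (Pre_positive_negative_conversion relationship_strengths) := by unfold Pre_positive_negative_conversion; infer_instance

def pvWitness_positive_negative_conversion : (List (String × List (String × Int))) :=
  [("a", [("b", 2), ("c", -1), ("d", 0), ("e", 1)]), ("b", [])]

def Spec_positive_negative_conversion (relationship_strengths : List (String × List (String × Int))) (out : List (String × List (String × String))) : Prop := out = positive_negative_conversion_alt relationship_strengths
instance (relationship_strengths : List (String × List (String × Int))) (out : List (String × List (String × String))) : Decidable (Spec_positive_negative_conversion relationship_strengths out) := by unfold Spec_positive_negative_conversion; infer_instance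

-- ===== CLAIM (what is proved, stated in full; the proofs are below) =====
def Claim_equal_positive_negative_conversion : Prop := ∀ (relationship_strengths : List (String × List (String × Int))), Dom_positive_negative_conversion relationship_strengths → Pre_positive_negative_conversion relationship_strengths → Spec_positive_negative_conversion relationship_strengths (positive_negative_conversion relationship_strengths)

-- ===== LEMMAS AND PROOFS =====

-- the per-entry conversion, shared characterisation
def pncConv (v : Int) : Option String :=
  if v < 0 then some "-" else if v > 1 then some "+" else none

def pncF (q : String × Option String) : Option (String × String) := q.2.map (fun s => (q.1, s))

lemma pncPhase1_spec (inner : List (String × Int)) (a : List (String × Option String)) (n : List String) :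
    inner.foldl (fun acc p =>
      if p.2 < 0 then (acc.1 ++ [(p.1, some "-")], acc.2)
      else if p.2 > 1 then (acc.1 ++ [(p.1, some "+")], acc.2)
      else (acc.1 ++ [(p.1, none)], acc.2 ++ [p.1])) (a, n) =
    (a ++ inner.map (fun p => (p.1, pncConv p.2)),
     n ++ (inner.filter (fun p => decide (¬ p.2 < 0) && decide (¬ p.2 > 1))).map Prod.fst) := by
  induction inner generalizing a n with
  | nil => simp
  | cons p rest ih =>
    simp only [List.foldl_cons]
    by_cases h1 : p.2 < 0
    · simp [h1, ih, pncConv]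
    · by_cases h2 : p.2 > 1
      · simp [h1, h2, ih, pncConv]
      · rw [ih]
        rw [List.filter_cons_of_pos (by simp [h1, h2])]
        simp [pncConv, h1, h2]

-- popping a key whose (unique) entry is `none` leaves the filterMap unchanged,
-- preserves nodup keys, and keeps every other entry
lemma pncPop_filterMap {m : List (String × Option String)} {k : String}
    (hnd : (m.map Prod.fst).Nodup) (hmem : (k, (none : Option String)) ∈ m) :
    (pncPop m k).filterMap pncF = m.filterMap pncF := by
  induction m with
  | nil => simp at hmem
  | cons q rest ih =>
    simp only [List.map_cons, List.nodup_cons] at hnd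
    by_cases hq : q.1 = k
    · have hqv : q = (k, none) := by
        rcases List.mem_cons.mp hmem with h | h
        · cases q; cases h; rfl
        · exact absurd (hq ▸ List.mem_map_of_mem h) hnd.1
      rw [show pncPop (q :: rest) k = rest from by simp [pncPop, hq]]
      rw [hqv, List.filterMap_cons]
      rfl
    · have hmem' : (k, (none : Option String)) ∈ rest := by
        rcases List.mem_cons.mp hmem with h | h
        · exact absurd (congrArg Prod.fst h).symm hq
        · exact h
      simp only [pncPop, beq_iff_eq, if_neg hq]
      rw [List.filterMap_cons, List.filterMap_cons, ih hnd.2 hmem']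

lemma pncPop_sublist (m : List (String × Option String)) (k : String) :
    (pncPop m k).Sublist m := by
  induction m with
  | nil => simp [pncPop]
  | cons q rest ih =>
    by_cases hq : q.1 = k
    · simp [pncPop, hq]
    · simpa [pncPop, hq] using ih.cons₂ q

lemma pncPop_mem {m : List (String × Option String)} {k k' : String}
    (hnd : (m.map Prod.fst).Nodup) (hne : k' ≠ k)
    (hmem : (k', (none : Option String)) ∈ m) :
    (k', (none : Option String)) ∈ pncPop m k := by
  induction m with
  | nil => simp at hmem
  | cons q rest ih =>
    simp only [List.map_cons, List.nodup_cons] at hnd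
    by_cases hq : q.1 = k
    · simp only [pncPop, beq_iff_eq, if_pos hq]
      rcases List.mem_cons.mp hmem with h | h
      · exact absurd ((congrArg Prod.fst h).trans hq) hne
      · exact h
    · simp only [pncPop, beq_iff_eq, if_neg hq]
      rcases List.mem_cons.mp hmem with h | h
      · exact h ▸ List.mem_cons_self
      · exact List.mem_cons_of_mem _ (ih hnd.2 h)

-- popping every key of a nodup list of neutral keys does not change the filterMap
lemma pnc_foldl_pop (ns : List String) :
    ∀ (m : List (String × Option String)), (m.map Prod.fst).Nodup → ns.Nodup →
    (∀ k ∈ ns, (k, (none : Option String)) ∈ m) →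
    (ns.foldl pncPop m).filterMap pncF = m.filterMap pncF := by
  induction ns with
  | nil => intro m _ _ _; rfl
  | cons k ns ih =>
    intro m hnd hns hmem
    simp only [List.nodup_cons] at hns
    have hk : (k, (none : Option String)) ∈ m := hmem k (.head _)
    have hnd' : ((pncPop m k).map Prod.fst).Nodup :=
      ((pncPop_sublist m k).map Prod.fst).nodup hnd
    have hmem' : ∀ k' ∈ ns, (k', (none : Option String)) ∈ pncPop m k := by
      intro k' hk'
      exact pncPop_mem hnd (fun h => hns.1 (h ▸ hk')) (hmem k' (.tail _ hk'))
    calc ((k :: ns).foldl pncPop m).filterMap pncF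
        = (ns.foldl pncPop (pncPop m k)).filterMap pncF := rfl
      _ = (pncPop m k).filterMap pncF := ih _ hnd' hns.2 hmem'
      _ = m.filterMap pncF := pncPop_filterMap hnd hk

-- B's recursion computes the filterMap of the shared per-entry conversion
lemma pncConvert_spec (inner : List (String × Int)) :
    pncConvert inner = inner.filterMap (fun p => (pncConv p.2).map (fun s => (p.1, s))) := by
  induction inner with
  | nil => rfl
  | cons p rest ih =>
    obtain ⟨k, v⟩ := p
    by_cases h1 : v < 0
    · simp [pncConvert, pncConv, h1, ih]
    · by_cases h2 : v > 1
      · simp [pncConvert, pncConv, h1, h2, ih]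
      · simp [pncConvert, pncConv, h1, h2, ih]

-- the per-player equivalence: A's phase1 + pops + type-fixing filterMap = B's recursion
lemma pnc_inner (inner : List (String × Int)) (hnd : (inner.map Prod.fst).Nodup) :
    (let st := pncPhase1 inner
     (st.2.foldl pncPop st.1).filterMap pncF) = pncConvert inner := by
  have h1 : pncPhase1 inner =
      (inner.map (fun p => (p.1, pncConv p.2)),
       (inner.filter (fun p => decide (¬ p.2 < 0) && decide (¬ p.2 > 1))).map Prod.fst) := by
    simpa using pncPhase1_spec inner [] []
  have hm : ((inner.map (fun p => (p.1, pncConv p.2))).map Prod.fst).Nodup := by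
    simpa [Function.comp] using hnd
  have hns : ((inner.filter (fun p => decide (¬ p.2 < 0) && decide (¬ p.2 > 1))).map Prod.fst).Nodup :=
    (List.filter_sublist.map Prod.fst).nodup hnd
  have hmem : ∀ k ∈ (inner.filter (fun p => decide (¬ p.2 < 0) && decide (¬ p.2 > 1))).map Prod.fst,
      (k, (none : Option String)) ∈ inner.map (fun p => (p.1, pncConv p.2)) := by
    intro k hk
    rcases List.mem_map.mp hk with ⟨p, hp, hpk⟩
    rcases List.mem_filter.mp hp with ⟨hpin, hcond⟩
    simp only [Bool.and_eq_true, decide_eq_true_eq] at hcond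
    refine List.mem_map.mpr ⟨p, hpin, ?_⟩
    simp [hpk, pncConv, hcond.1, hcond.2]
  simp only [h1]
  rw [pnc_foldl_pop _ _ hm hns hmem, List.filterMap_map, pncConvert_spec]
  apply List.filterMap_congr
  intro p _
  simp [pncF, Function.comp]

-- ===== VERDICT (by name: the statement is the Claim_ definition above) =====
theorem positive_negative_conversion_spec : Claim_equal_positive_negative_conversion := by
  intro rs _ hpre
  show positive_negative_conversion rs = positive_negative_conversion_alt rs
  unfold positive_negative_conversion positive_negative_conversion_alt
  apply List.map_congr_left
  intro pr hpr
  have := pnc_inner pr.2 (hpre.2 pr hpr)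
  simp only [pncF] at this
  simp [this]
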